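-- pv_equiv track=rewrite | github.com/minhjih/scene_aware_robot_pathfinding | src/wifi_layer.py | get_ru_block_boundaries
-- ===== SOURCE A (Python) =====
-- RU_BLOCK_COUNT = {0: 1, 1: 2, 2: 4, 3: 9}
--
-- def get_ru_block_boundaries(ru_type: int, n_sc: int = 234) -> list:
--     """
--     Return (start, end) subcarrier index pairs for each RU block.
--
--     The NUM_DATA_SC=234 data subcarriers are partitioned into
--     RU_BLOCK_COUNT[ru_type] contiguous, non-overlapping blocks.
--     First (n_sc % n_blocks) blocks get one extra subcarrier to cover remainder.
--
--         ru_type=3: 9 × 26 SC  (9×26=234, exact)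
--         ru_type=2: 4 × [59,59,58,58] SC
--         ru_type=1: 2 × 117 SC
--         ru_type=0: 1 × 234 SC
--     """
--     n_blocks = RU_BLOCK_COUNT[ru_type]
--     base = n_sc // n_blocks
--     rem  = n_sc % n_blocks          # first `rem` blocks get one extra SC
--     boundaries, s = [], 0
--     for b in range(n_blocks):
--         e = s + base + (1 if b < rem else 0)
--         boundaries.append((s, e))
--         s = e
--     return boundaries
-- ===== SOURCE B (Python) =====
-- RU_BLOCK_COUNT = {0: 1, 1: 2, 2: 4, 3: 9}
--
-- def get_ru_block_boundaries(ru_type: int, n_sc: int = 234) -> list: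
--     """Closed-form block boundaries: no running accumulator between blocks."""
--     n_blocks = RU_BLOCK_COUNT[ru_type]
--     base, rem = divmod(n_sc, n_blocks)
--     return [(b * base + min(b, rem), (b + 1) * base + min(b + 1, rem))
--             for b in range(n_blocks)]
-- ===== Notes on version B (the rewrite author's own statement) =====
-- stated objective: alternative
-- what changed: Replaces the sequential accumulator loop (carrying the running boundary s between iterations) with an independent closed-form formula per block, start(b) = b*base + min(b, rem), emitted by a single comprehension.
import Mathlib
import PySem

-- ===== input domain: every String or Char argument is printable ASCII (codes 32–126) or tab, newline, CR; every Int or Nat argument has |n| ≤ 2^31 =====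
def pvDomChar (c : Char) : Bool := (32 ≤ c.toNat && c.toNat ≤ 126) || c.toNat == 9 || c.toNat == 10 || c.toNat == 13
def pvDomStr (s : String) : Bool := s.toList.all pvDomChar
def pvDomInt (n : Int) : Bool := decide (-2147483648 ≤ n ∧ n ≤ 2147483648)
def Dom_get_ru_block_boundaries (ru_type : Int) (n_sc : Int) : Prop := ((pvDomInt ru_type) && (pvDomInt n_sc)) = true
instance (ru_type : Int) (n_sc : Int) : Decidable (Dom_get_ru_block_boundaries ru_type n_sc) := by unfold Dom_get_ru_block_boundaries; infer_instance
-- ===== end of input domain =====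

-- B replaces the accumulator loop by an independent closed-form formula per block (alternative decomposition; return value only).

-- ===== PORT A =====
def RU_BLOCK_COUNT : PySem.Dict Int Int := PySem.Dict.ofList [(0, 1), (1, 2), (2, 4), (3, 9)]

def get_ru_block_boundaries (ru_type : Int) (n_sc : Int) : List (Int × Int) :=
  match RU_BLOCK_COUNT.get? ru_type with
  | none => []   -- KeyError in Python; excluded by Pre_
  | some n_blocks =>
    let base := PySem.Int.floordiv n_sc n_blocks
    let rem  := PySem.Int.mod n_sc n_blocks
    ((PySem.List.pyRange 0 n_blocks 1).foldl
      (fun (st : List (Int × Int) × Int) b =>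
        let e := st.2 + base + (if b < rem then (1 : Int) else 0)
        (st.1 ++ [(st.2, e)], e))
      ([], 0)).1

-- ===== PORT B =====
def get_ru_block_boundaries_alt (ru_type : Int) (n_sc : Int) : List (Int × Int) :=
  match RU_BLOCK_COUNT.get? ru_type with
  | none => []   -- KeyError in Python; excluded by Pre_
  | some n_blocks =>
    let base := PySem.Int.floordiv n_sc n_blocks
    let rem  := PySem.Int.mod n_sc n_blocks
    (PySem.List.pyRange 0 n_blocks 1).map
      (fun b => (b * base + min b rem, (b + 1) * base + min (b + 1) rem))

-- ===== PRECONDITION & SPEC =====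
-- Pre_ excludes exactly the ru_type values outside RU_BLOCK_COUNT, on which A raises KeyError.
def Pre_get_ru_block_boundaries (ru_type : Int) (n_sc : Int) : Prop :=
  ru_type = 0 ∨ ru_type = 1 ∨ ru_type = 2 ∨ ru_type = 3
instance (ru_type : Int) (n_sc : Int) : Decidable (Pre_get_ru_block_boundaries ru_type n_sc) := by unfold Pre_get_ru_block_boundaries; infer_instance
def pvWitness_get_ru_block_boundaries : Int × Int := (3, 234)

def Spec_get_ru_block_boundaries (ru_type : Int) (n_sc : Int) (out : List (Int × Int)) : Prop := out = get_ru_block_boundaries_alt ru_type n_sc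
instance (ru_type : Int) (n_sc : Int) (out : List (Int × Int)) : Decidable (Spec_get_ru_block_boundaries ru_type n_sc out) := by unfold Spec_get_ru_block_boundaries; infer_instance

-- ===== CLAIM (what is proved, stated in full; the proofs are below) =====
def Claim_equal_get_ru_block_boundaries : Prop := ∀ (ru_type : Int) (n_sc : Int), Dom_get_ru_block_boundaries ru_type n_sc → Pre_get_ru_block_boundaries ru_type n_sc → Spec_get_ru_block_boundaries ru_type n_sc (get_ru_block_boundaries ru_type n_sc)

-- ===== LEMMAS AND PROOFS =====

-- Loop invariant: after b steps the running boundary is b*base + min b rem, and the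
-- accumulated list is B's closed-form map.
theorem ru_loop_eq (n : Int) (hn : 0 ≤ n) (base rem : Int) (hrem : 0 ≤ rem) :
    (PySem.List.pyRange 0 n 1).foldl
      (fun (st : List (Int × Int) × Int) b =>
        let e := st.2 + base + (if b < rem then (1 : Int) else 0)
        (st.1 ++ [(st.2, e)], e))
      ([], 0)
    = ((PySem.List.pyRange 0 n 1).map
        (fun b => (b * base + min b rem, (b + 1) * base + min (b + 1) rem)),
       n * base + min n rem) := by
  induction n, hn using Int.le_induction with
  | base =>
      rw [PySem.List.pyRange_one_eq_nil le_rfl]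
      simp only [List.foldl_nil, List.map_nil]
      rw [show (0:Int) * base + min 0 rem = 0 from by rw [min_eq_left hrem]; ring]
  | succ n hn ih =>
      rw [PySem.List.pyRange_one_succ_right hn, List.foldl_append, List.map_append, ih]
      simp only [List.foldl_cons, List.foldl_nil, List.map_cons, List.map_nil]
      have h1 : n * base + min n rem + base + (if n < rem then (1 : Int) else 0)
          = (n + 1) * base + min (n + 1) rem := by
        rw [show (n + 1) * base = n * base + base from by ring]
        generalize n * base = t
        split_ifs with h <;> omega
      rw [h1]

-- ===== VERDICT (by name: the statement is the Claim_ definition above) =====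
theorem get_ru_block_boundaries_spec : Claim_equal_get_ru_block_boundaries := by
  intro ru_type n_sc _ hpre
  unfold Spec_get_ru_block_boundaries get_ru_block_boundaries get_ru_block_boundaries_alt
  rcases hpre with h | h | h | h <;> subst h
  · rw [show RU_BLOCK_COUNT.get? (0:Int) = some 1 from by decide]
    dsimp only
    rw [ru_loop_eq 1 (by norm_num) _ _ (PySem.Int.mod_nonneg (a:=n_sc) (b:=1) (by norm_num))]
  · rw [show RU_BLOCK_COUNT.get? (1:Int) = some 2 from by decide]
    dsimp only
    rw [ru_loop_eq 2 (by norm_num) _ _ (PySem.Int.mod_nonneg (a:=n_sc) (b:=2) (by norm_num))]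
  · rw [show RU_BLOCK_COUNT.get? (2:Int) = some 4 from by decide]
    dsimp only
    rw [ru_loop_eq 4 (by norm_num) _ _ (PySem.Int.mod_nonneg (a:=n_sc) (b:=4) (by norm_num))]
  · rw [show RU_BLOCK_COUNT.get? (3:Int) = some 9 from by decide]
    dsimp only
    rw [ru_loop_eq 9 (by norm_num) _ _ (PySem.Int.mod_nonneg (a:=n_sc) (b:=9) (by norm_num))]
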